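-- pv_equiv track=rewrite | github.com/angrysky56/rulial-navigator | src/rulial/engine/turing.py | _clean_tape
-- ===== SOURCE A (Python) =====
-- from typing import Dict, List, Tuple
--
-- def _clean_tape(tape: Tuple[int, ...]) -> Tuple[int, ...]:
--     """Strip leading/trailing zeros."""
--     if not tape:
--         return ()
--     start, end = 0, len(tape)
--     while start < end and tape[start] == 0:
--         start += 1
--     while end > start and tape[end - 1] == 0:
--         end -= 1
--     return tape[start:end]
-- ===== SOURCE B (Python) =====
-- def _clean_tape(tape):
--     """Strip leading/trailing zeros."""
--     nz = [i for i, x in enumerate(tape) if x != 0]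
--     if not nz:
--         return ()
--     return tape[nz[0]:nz[-1] + 1]
-- ===== Notes on version B (the rewrite author's own statement) =====
-- stated objective: simpler
-- what changed: Replaces the two inward boundary while-loops over indices by a single comprehension collecting the non-zero positions and one slice between the first and last of them.
import Mathlib
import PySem

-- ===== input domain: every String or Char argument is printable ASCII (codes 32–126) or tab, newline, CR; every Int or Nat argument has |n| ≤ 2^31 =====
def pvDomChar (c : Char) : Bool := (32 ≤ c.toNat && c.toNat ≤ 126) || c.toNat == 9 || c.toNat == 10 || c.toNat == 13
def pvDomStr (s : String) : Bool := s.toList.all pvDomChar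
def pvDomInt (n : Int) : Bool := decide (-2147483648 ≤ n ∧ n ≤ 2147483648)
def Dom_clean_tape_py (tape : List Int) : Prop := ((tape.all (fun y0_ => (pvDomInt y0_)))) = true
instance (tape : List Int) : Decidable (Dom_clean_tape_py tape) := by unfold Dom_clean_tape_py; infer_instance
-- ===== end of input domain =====

-- B replaces A's two inward boundary while-loops by one scan collecting the
-- non-zero positions and a single slice between the first and last of them (objective: simpler).

-- ===== PORT A =====
-- `while start < end and tape[start] == 0: start += 1`
def cleanLoop1 (tape : List Int) (start e : Nat) : Nat :=
  if start < e ∧ PySem.List.pyGet? tape (start : Int) = some 0 then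
    cleanLoop1 tape (start + 1) e
  else start
termination_by e - start
decreasing_by omega

-- `while end > start and tape[end - 1] == 0: end -= 1`
def cleanLoop2 (tape : List Int) (start e : Nat) : Nat :=
  if e > start ∧ PySem.List.pyGet? tape ((e : Int) - 1) = some 0 then
    cleanLoop2 tape start (e - 1)
  else e
termination_by e - start
decreasing_by omega

def clean_tape_py (tape : List Int) : List Int :=
  if tape = [] then []
  else
    let s := cleanLoop1 tape 0 tape.length
    let e := cleanLoop2 tape s tape.length
    PySem.List.slice tape (some (s : Int)) (some (e : Int))

-- ===== PORT B =====
def clean_tape_py_alt (tape : List Int) : List Int :=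
  let nz := ((PySem.List.enumerate tape 0).filter (fun p => p.2 != 0)).map Prod.fst
  match nz with
  | [] => []
  | i :: rest =>
      PySem.List.slice tape (some i) (some ((i :: rest).getLast (List.cons_ne_nil _ _) + 1))

-- ===== PRECONDITION & SPEC =====
def Spec_clean_tape_py (tape : List Int) (out : List Int) : Prop := out = clean_tape_py_alt tape
instance (tape : List Int) (out : List Int) : Decidable (Spec_clean_tape_py tape out) := by unfold Spec_clean_tape_py; infer_instance

-- ===== CLAIM (what is proved, stated in full; the proofs are below) =====
def Claim_equal_clean_tape_py : Prop := ∀ (tape : List Int), Dom_clean_tape_py tape → Spec_clean_tape_py tape (clean_tape_py tape)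

-- ===== LEMMAS AND PROOFS =====

-- number of leading zeros
def lz (t : List Int) : Nat := (t.takeWhile (fun x => x == 0)).length

-- the non-zero index list of B, with a general enumeration offset
def nzA (t : List Int) (k : Int) : List Int :=
  ((PySem.List.enumerate t k).filter (fun p => p.2 != 0)).map Prod.fst

theorem nzA_cons (x : Int) (t : List Int) (k : Int) :
    nzA (x :: t) k = if x = 0 then nzA t (k + 1) else k :: nzA t (k + 1) := by
  by_cases hx : x = 0 <;> simp [nzA, PySem.List.enumerate_cons, hx]

theorem lz_cons (x : Int) (t : List Int) :
    lz (x :: t) = if x = 0 then lz t + 1 else 0 := by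
  by_cases hx : x = 0 <;> simp [lz, hx]

theorem nzA_nil_iff (t : List Int) (k : Int) :
    nzA t k = [] ↔ ∀ x ∈ t, x = 0 := by
  induction t generalizing k with
  | nil => simp [nzA]
  | cons x t ih =>
    by_cases hx : x = 0 <;> simp [nzA_cons, hx, ih]

theorem nzA_head (t : List Int) (k : Int) (i : Int) (rest : List Int)
    (h : nzA t k = i :: rest) : i = k + (lz t : Int) := by
  induction t generalizing k i rest with
  | nil => simp [nzA] at h
  | cons x t ih =>
    rw [nzA_cons] at h
    by_cases hx : x = 0
    · rw [if_pos hx] at h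
      have := ih (k + 1) i rest h
      rw [lz_cons, if_pos hx]
      push_cast
      omega
    · rw [if_neg hx] at h
      rw [lz_cons, if_neg hx]
      injection h with h1 h2
      omega

theorem nzA_getLast (t : List Int) (k : Int) (nz : List Int) (hnz : nz ≠ [])
    (h : nzA t k = nz) :
    nz.getLast hnz = k + (t.length : Int) - 1 - (lz t.reverse : Int) := by
  induction t using List.reverseRecOn generalizing k nz with
  | nil => simp [nzA] at h; simp [h] at hnz
  | append_singleton t x ih =>
    have hsplit : nzA (t ++ [x]) k = nzA t k ++ nzA [x] (k + t.length) := by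
      simp [nzA, PySem.List.enumerate_append]
    have hrev : (t ++ [x]).reverse = x :: t.reverse := by simp
    by_cases hx : x = 0
    · have hx1 : nzA [x] (k + t.length) = [] := by
        simp [nzA, PySem.List.enumerate_cons, hx]
      rw [hsplit, hx1, List.append_nil] at h
      have := ih (k := k) (nz := nz) hnz h
      rw [this, hrev, lz_cons, if_pos hx, List.length_append, List.length_singleton]
      push_cast
      omega
    · have hx1 : nzA [x] (k + t.length) = [k + t.length] := by
        simp [nzA, PySem.List.enumerate_cons, hx]
      rw [hsplit, hx1] at h
      subst h
      have hg : (nzA t k ++ [k + (t.length : Int)]).getLast hnz = k + t.length := by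
        simp
      rw [hg, hrev, lz_cons, if_neg hx, List.length_append, List.length_singleton]
      push_cast
      omega

theorem cleanLoop1_eq (t : List Int) (s : Nat) :
    cleanLoop1 t s t.length = s + lz (t.drop s) := by
  fun_induction cleanLoop1 t s t.length with
  | case1 s h ih =>
    obtain ⟨hlt, hget⟩ := h
    rw [PySem.List.pyGet?_natCast] at hget
    have hdrop : t.drop s = t[s] :: t.drop (s + 1) :=
      List.drop_eq_getElem_cons hlt
    have hz : t[s] = 0 := by
      have h' : t[s]? = some t[s] := List.getElem?_eq_getElem hlt
      rw [h'] at hget; exact Option.some_inj.mp hget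
    rw [ih, hdrop, lz_cons, if_pos hz]
    omega
  | case2 s h =>
    rcases Nat.lt_or_ge s t.length with hlt | hge
    · have hz : ¬ t[s] = 0 := by
        intro hz
        exact h ⟨hlt, by rw [PySem.List.pyGet?_natCast, List.getElem?_eq_getElem hlt, hz]⟩
      have hdrop : t.drop s = t[s] :: t.drop (s + 1) :=
        List.drop_eq_getElem_cons hlt
      rw [hdrop, lz_cons, if_neg hz]
      omega
    · rw [List.drop_eq_nil_of_le hge]
      simp [lz]

theorem cleanLoop2_eq (t : List Int) (s e : Nat) :
    s ≤ e → e ≤ t.length → cleanLoop2 t s e = max s (e - lz (t.take e).reverse) := by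
  fun_induction cleanLoop2 t s e with
  | case1 e h ih =>
    intro hse he
    obtain ⟨hlt, hget⟩ := h
    have he1 : e - 1 < t.length := by omega
    have hcast : (e : Int) - 1 = ((e - 1 : Nat) : Int) := by omega
    rw [hcast, PySem.List.pyGet?_natCast] at hget
    have hz : t[e-1] = 0 := by
      have h' : t[e-1]? = some t[e-1] := List.getElem?_eq_getElem he1
      rw [h'] at hget; exact Option.some_inj.mp hget
    have htake : t.take e = t.take (e - 1) ++ [t[e-1]] := by
      have h2 : e = (e - 1) + 1 := by omega
      conv_lhs => rw [h2]
      rw [List.take_add_one, List.getElem?_eq_getElem he1]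
      simp
    rw [ih (by omega) (by omega), htake, List.reverse_append]
    simp only [List.reverse_singleton, List.singleton_append, lz_cons, if_pos hz]
    omega
  | case2 e h =>
    intro hse he
    rcases Nat.lt_or_ge s e with hlt | hge
    · have he1 : e - 1 < t.length := by omega
      have hz : ¬ t[e-1] = 0 := by
        intro hz
        refine h ⟨hlt, ?_⟩
        have hcast : (e : Int) - 1 = ((e - 1 : Nat) : Int) := by omega
        rw [hcast, PySem.List.pyGet?_natCast, List.getElem?_eq_getElem he1, hz]
      have htake : t.take e = t.take (e - 1) ++ [t[e-1]] := by
        have h2 : e = (e - 1) + 1 := by omega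
        conv_lhs => rw [h2]
        rw [List.take_add_one, List.getElem?_eq_getElem he1]
        simp
      rw [htake, List.reverse_append]
      simp only [List.reverse_singleton, List.singleton_append, lz_cons, if_neg hz]
      omega
    · omega

theorem lz_le_length (t : List Int) : lz t ≤ t.length :=
  (List.takeWhile_sublist _).length_le

theorem lz_all_zero (t : List Int) (h : ∀ x ∈ t, x = 0) : lz t = t.length := by
  unfold lz
  rw [List.takeWhile_eq_self_iff.mpr (by intro x hx; simp [h x hx])]

theorem head_le_getLast (l : List Int) (hl : l ≠ []) (hp : l.Pairwise (· < ·)) :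
    l.head hl ≤ l.getLast hl := by
  induction l with
  | nil => simp at hl
  | cons a l ih =>
    cases l with
    | nil => simp
    | cons b m =>
      rw [List.getLast_cons (by simp), List.head_cons]
      have h1 := ih (by simp) (List.Pairwise.of_cons hp)
      rw [List.head_cons] at h1
      have h2 : a < b := (List.pairwise_cons.mp hp).1 b (by simp)
      omega

-- ===== VERDICT (by name: the statement is the Claim_ definition above) =====
theorem clean_tape_py_spec : Claim_equal_clean_tape_py := by
  intro tape _
  unfold Spec_clean_tape_py clean_tape_py clean_tape_py_alt
  by_cases hnil : tape = []
  · subst hnil; simp [PySem.List.enumerate]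
  · simp only [if_neg hnil]
    rw [cleanLoop1_eq tape 0]
    simp only [List.drop_zero, Nat.zero_add]
    rw [cleanLoop2_eq tape (lz tape) tape.length (lz_le_length tape) (le_refl _)]
    rw [List.take_length]
    rw [show (List.map Prod.fst (List.filter (fun p => p.2 != 0)
      (PySem.List.enumerate tape))) = nzA tape 0 from rfl]
    rcases h : nzA tape 0 with _ | ⟨i, rest⟩
    · -- all the tape's cells are zero
      have hall : ∀ x ∈ tape, x = 0 := (nzA_nil_iff tape 0).mp h
      have h1 : lz tape = tape.length := lz_all_zero tape hall
      rw [h1, Nat.max_eq_left (by omega), PySem.List.slice_natCast]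
      simp
    · -- the tape has a non-zero cell
      have hhead : i = (lz tape : Int) := by simpa using nzA_head tape 0 i rest h
      have hlast : (i :: rest).getLast (List.cons_ne_nil _ _)
          = (tape.length : Int) - 1 - (lz tape.reverse : Int) := by
        have := nzA_getLast tape 0 (i :: rest) (List.cons_ne_nil _ _) h
        omega
      have hle : i ≤ (i :: rest).getLast (List.cons_ne_nil _ _) := by
        have hpw : (nzA tape 0).Pairwise (· < ·) :=
          List.Pairwise.map _ (fun a b hab => hab)
            (List.Pairwise.filter _ (PySem.List.pairwise_lt_enumerate tape 0))
        rw [h] at hpw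
        simpa using head_le_getLast (i :: rest) (List.cons_ne_nil _ _) hpw
      have hrange : lz tape + lz tape.reverse < tape.length := by omega
      show _ = PySem.List.slice tape (some i)
        (some ((i :: rest).getLast (List.cons_ne_nil i rest) + 1))
      subst hhead
      rw [hlast]
      have e1 : (tape.length : Int) - 1 - (lz tape.reverse : Int) + 1
          = ((tape.length - lz tape.reverse : Nat) : Int) := by omega
      have e2 : max (lz tape) (tape.length - lz tape.reverse)
          = tape.length - lz tape.reverse := by omega
      rw [e1, e2, PySem.List.slice_natCast]
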